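-- pv_equiv track=rewrite | github.com/tomislavrupic/stability-oracle | oracle/metrics_propagation.py | _walk_backward
-- ===== SOURCE A (Python) =====
-- from collections import deque
--
-- def _walk_backward(start_nodes: tuple[str, ...], incoming: dict[str, tuple[str, ...]]) -> set[str]:
--     visited: set[str] = set()
--     queue = deque(start_nodes)
--     while queue:
--         current = queue.popleft()
--         if current in visited:
--             continue
--         visited.add(current)
--         queue.extend(incoming[current])
--     return visited
-- ===== SOURCE B (Python) =====
-- def _walk_backward(start_nodes, incoming):
--     # Level-synchronous traversal: no deque; process one whole frontier at a
--     # time, collecting the concatenated predecessor lists as the next frontier.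
--     visited = set()
--     frontier = list(start_nodes)
--     while frontier:
--         next_frontier = []
--         for node in frontier:
--             if node not in visited:
--                 visited.add(node)
--                 next_frontier.extend(incoming[node])
--         frontier = next_frontier
--     return visited
-- ===== Notes on version B (the rewrite author's own statement) =====
-- stated objective: alternative
-- what changed: Replaced the node-at-a-time deque BFS with a level-synchronous traversal: each iteration filters one whole frontier against the visited set and builds the next frontier as the concatenation of the newly visited nodes' predecessor lists, so no queue data structure is maintained.
-- outside the precondition, e.g. on _walk_backward(('a',), {'a': (), 'b': ('c',)}): A returns {'a'}, B returns {'a'}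
import Mathlib
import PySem

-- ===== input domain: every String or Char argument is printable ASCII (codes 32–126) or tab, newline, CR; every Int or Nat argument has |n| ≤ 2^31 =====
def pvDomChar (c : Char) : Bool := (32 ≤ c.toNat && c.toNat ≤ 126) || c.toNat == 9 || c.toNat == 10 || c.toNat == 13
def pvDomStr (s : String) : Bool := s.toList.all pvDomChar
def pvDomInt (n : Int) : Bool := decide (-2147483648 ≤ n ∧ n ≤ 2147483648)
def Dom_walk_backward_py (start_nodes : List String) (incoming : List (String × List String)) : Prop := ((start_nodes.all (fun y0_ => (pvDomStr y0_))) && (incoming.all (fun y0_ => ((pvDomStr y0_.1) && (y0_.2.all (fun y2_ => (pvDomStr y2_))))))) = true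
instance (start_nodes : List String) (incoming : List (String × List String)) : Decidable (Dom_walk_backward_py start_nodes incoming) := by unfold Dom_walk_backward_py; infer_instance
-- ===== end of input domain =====

-- B changes the traversal decomposition: level-synchronous frontiers instead of a node-at-a-time deque (alternative, same cost); return value only — neither version mutates its arguments.

-- incoming[x]  (dict lookup, first match; none = KeyError)
def pvLk (incoming : List (String × List String)) (x : String) : Option (List String) :=
  (PySem.Dict.mk incoming).get? x

-- fuel bound: every queue/frontier element is consumed once; at most
-- |start_nodes| + Σ |incoming[k]| elements are ever produced (totality guard only)
def pvFuel (start_nodes : List String) (incoming : List (String × List String)) : Nat :=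
  start_nodes.length + (incoming.map (fun p => p.2.length)).sum

-- ===== PORT A =====
-- the while loop over the deque: one fuel unit per popped element
def goA (incoming : List (String × List String)) : Nat → PySem.Set String → List String → PySem.Set String
  | 0, v, _ => v
  | _ + 1, v, [] => v
  | n + 1, v, x :: q =>
    if PySem.Set.contains v x then goA incoming n v q
    else
      match pvLk incoming x with
      | none => v            -- KeyError: excluded by Pre_
      | some ps => goA incoming n (PySem.Set.add v x) (q ++ ps)

def walk_backward_py (start_nodes : List String) (incoming : List (String × List String)) : List String :=
  goA incoming (pvFuel start_nodes incoming) PySem.Set.empty start_nodes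

-- ===== PORT B =====
-- the inner 'for node in frontier' loop: returns (visited, next_frontier, key-error?)
def goBLevel (incoming : List (String × List String)) : List String → PySem.Set String → PySem.Set String × List String × Bool
  | [], v => (v, [], false)
  | x :: xs, v =>
    if PySem.Set.contains v x then goBLevel incoming xs v
    else
      match pvLk incoming x with
      | none => (v, [], true)    -- KeyError: excluded by Pre_
      | some ps =>
        let r := goBLevel incoming xs (PySem.Set.add v x)
        (r.1, ps ++ r.2.1, r.2.2)

-- the outer 'while frontier' loop; fuel = total elements, a level consumes |frontier|
def goB (incoming : List (String × List String)) (n : Nat) (v : PySem.Set String) (f : List String) : PySem.Set String :=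
  if _hf : f = [] then v
  else if _h : n < f.length then v    -- out of fuel: never reached under Pre_
  else
    let r := goBLevel incoming f v
    if r.2.2 then r.1
    else goB incoming (n - f.length) r.1 r.2.1
termination_by n
decreasing_by have := List.length_pos_of_ne_nil _hf; omega

def walk_backward_py_alt (start_nodes : List String) (incoming : List (String × List String)) : List String :=
  goB incoming (pvFuel start_nodes incoming) PySem.Set.empty start_nodes

-- ===== PRECONDITION & SPEC =====
-- Pre_ excludes the inputs where the Python raises KeyError (a looked-up node missing
-- from incoming); it asks every mentioned node (start node or predecessor) to be a key,
-- which is slightly stronger than 'every REACHABLE node is a key': it also drops some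
-- inputs where a missing node is never reached and both programs return the same set.
def Pre_walk_backward_py (start_nodes : List String) (incoming : List (String × List String)) : Prop :=
  (∀ x ∈ start_nodes, (pvLk incoming x).isSome) ∧
  (∀ p ∈ incoming, ∀ y ∈ p.2, (pvLk incoming y).isSome)
instance (start_nodes : List String) (incoming : List (String × List String)) : Decidable (Pre_walk_backward_py start_nodes incoming) := by unfold Pre_walk_backward_py; infer_instance

def pvWitness_walk_backward_py : List String × (List (String × List String)) :=
  (["a"], [("a", ["b"]), ("b", [])])

def Spec_walk_backward_py (start_nodes : List String) (incoming : List (String × List String)) (out : List String) : Prop := out = walk_backward_py_alt start_nodes incoming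
instance (start_nodes : List String) (incoming : List (String × List String)) (out : List String) : Decidable (Spec_walk_backward_py start_nodes incoming out) := by unfold Spec_walk_backward_py; infer_instance

-- ===== CLAIM (what is proved, stated in full; the proofs are below) =====
def Claim_equal_walk_backward_py : Prop := ∀ (start_nodes : List String) (incoming : List (String × List String)), Dom_walk_backward_py start_nodes incoming → Pre_walk_backward_py start_nodes incoming → Spec_walk_backward_py start_nodes incoming (walk_backward_py start_nodes incoming)

-- ===== LEMMAS AND PROOFS =====

theorem contains_decide (v : PySem.Set String) (x : String) :
    PySem.Set.contains v x = decide (x ∈ v) := by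
  simp [PySem.Set.contains]

-- remaining budget: total length of the incoming-values of not-yet-visited keys
def pvS (incoming : List (String × List String)) (v : PySem.Set String) : Nat :=
  (incoming.map (fun p => if p.1 ∈ v then 0 else p.2.length)).sum

theorem pvS_mono (incoming : List (String × List String)) (v v' : PySem.Set String)
    (h : ∀ k, k ∈ v → k ∈ v') : pvS incoming v' ≤ pvS incoming v := by
  induction incoming with
  | nil => simp [pvS]
  | cons p t ih =>
    simp only [pvS, List.map_cons, List.sum_cons] at ih ⊢
    have h1 : (if p.1 ∈ v' then 0 else p.2.length) ≤ (if p.1 ∈ v then 0 else p.2.length) := by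
      by_cases a : p.1 ∈ v'
      · simp [a]
      · have b : p.1 ∉ v := fun hb => a (h _ hb)
        simp [a, b]
    omega

theorem mem_add_of_mem (v : PySem.Set String) (x k : String) (h : k ∈ v) :
    k ∈ PySem.Set.add v x := by simp [PySem.Set.mem_add, h]

theorem pvS_add (incoming : List (String × List String)) (v : PySem.Set String)
    (x : String) (ps : List String) (hlk : pvLk incoming x = some ps) (hx : x ∉ v) :
    pvS incoming (PySem.Set.add v x) + ps.length ≤ pvS incoming v := by
  induction incoming with
  | nil => simp [pvLk, PySem.Dict.get?] at hlk
  | cons p t ih =>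
    simp only [pvLk, PySem.Dict.get?, List.find?_cons] at hlk
    by_cases hk : p.1 = x
    · have hps : p.2 = ps := by
        simp [hk] at hlk; exact hlk
      simp only [pvS, List.map_cons, List.sum_cons]
      have h1 : (if p.1 ∈ PySem.Set.add v x then 0 else p.2.length) = 0 := by
        simp [hk]
      have h2 : (if p.1 ∈ v then 0 else p.2.length) = ps.length := by
        simp [hk, hx, hps]
      rw [h1, h2]
      have := pvS_mono t v (PySem.Set.add v x) (fun k hk => mem_add_of_mem v x k hk)
      simp only [pvS] at this
      omega
    · have hbe : (p.1 == x) = false := by simp [hk]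
      rw [hbe] at hlk; simp at hlk
      have hlk' : pvLk t x = some ps := by
        simp [pvLk, PySem.Dict.get?, hlk]
      have := ih hlk'
      simp only [pvS, List.map_cons, List.sum_cons]
      have heq : (if p.1 ∈ PySem.Set.add v x then 0 else p.2.length)
          = (if p.1 ∈ v then 0 else p.2.length) := by
        have : p.1 ∈ PySem.Set.add v x ↔ p.1 ∈ v := by
          simp [PySem.Set.mem_add, hk]
        simp only [this]
      rw [heq]
      simp only [pvS] at this
      omega

theorem goBLevel_noerr (incoming : List (String × List String)) (q : List String)
    (v : PySem.Set String) (h : ∀ x ∈ q, (pvLk incoming x).isSome) :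
    (goBLevel incoming q v).2.2 = false := by
  induction q generalizing v with
  | nil => simp [goBLevel]
  | cons x xs ih =>
    simp only [goBLevel]
    split_ifs with hc
    · exact ih v (fun y hy => h y (by simp [hy]))
    · cases hlk : pvLk incoming x with
      | none => have := h x (by simp); simp [hlk] at this
      | some ps => simpa using ih (PySem.Set.add v x) (fun y hy => h y (by simp [hy]))

theorem goBLevel_S (incoming : List (String × List String)) (q : List String)
    (v : PySem.Set String) (he : (goBLevel incoming q v).2.2 = false) :
    (goBLevel incoming q v).2.1.length + pvS incoming (goBLevel incoming q v).1 ≤ pvS incoming v := by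
  induction q generalizing v with
  | nil => simp [goBLevel]
  | cons x xs ih =>
    simp only [goBLevel] at he ⊢
    split_ifs at he ⊢ with hc
    · exact ih v he
    · cases hlk : pvLk incoming x with
      | none => simp [hlk] at he
      | some ps =>
        simp only [hlk] at he ⊢
        have hx : x ∉ v := by
          rw [contains_decide] at hc; simpa using hc
        have h1 := ih (PySem.Set.add v x) (by simpa using he)
        have h2 := pvS_add incoming v x ps hlk hx
        simp only [List.length_append]
        omega

theorem goBLevel_nf_sub (incoming : List (String × List String)) (q : List String)
    (v : PySem.Set String) :
    ∀ y ∈ (goBLevel incoming q v).2.1, ∃ p ∈ incoming, y ∈ p.2 := by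
  induction q generalizing v with
  | nil => simp [goBLevel]
  | cons x xs ih =>
    simp only [goBLevel]
    split_ifs with hc
    · exact ih v
    · cases hlk : pvLk incoming x with
      | none => simp
      | some ps =>
        intro y hy
        simp only [List.mem_append] at hy
        cases hy with
        | inl hy =>
          simp only [pvLk, PySem.Dict.get?] at hlk
          obtain ⟨p, hfind⟩ := Option.map_eq_some_iff.mp hlk
          exact ⟨p, List.mem_of_find?_eq_some hfind.1, hfind.2 ▸ hy⟩
        | inr hy => exact ih (PySem.Set.add v x) y hy

-- processing a prefix q of the queue consumes exactly q.length fuel and turns the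
-- queue into the rest plus the level's extensions
theorem goA_level (incoming : List (String × List String)) (q : List String) :
    ∀ (n : Nat) (v : PySem.Set String) (r : List String),
    (∀ x ∈ q, (pvLk incoming x).isSome) →
    goA incoming (q.length + n) v (q ++ r)
      = goA incoming n (goBLevel incoming q v).1 (r ++ (goBLevel incoming q v).2.1) := by
  induction q with
  | nil => intro n v r _; simp [goBLevel]
  | cons x xs ih =>
    intro n v r h
    have hx := h x (by simp)
    simp only [List.length_cons, List.cons_append]
    have hsucc : xs.length + 1 + n = (xs.length + n) + 1 := by omega
    rw [hsucc]
    simp only [goA, goBLevel]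
    split_ifs with hc
    · exact ih n v r (fun y hy => h y (by simp [hy]))
    · cases hlk : pvLk incoming x with
      | none => simp [hlk] at hx
      | some ps =>
        simp only
        have : (xs ++ r) ++ ps = xs ++ (r ++ ps) := by simp
        rw [this, ih n (PySem.Set.add v x) (r ++ ps) (fun y hy => h y (by simp [hy]))]
        simp

theorem goA_eq_goB (incoming : List (String × List String))
    (hinc : ∀ p ∈ incoming, ∀ y ∈ p.2, (pvLk incoming y).isSome) :
    ∀ (n : Nat) (v : PySem.Set String) (f : List String),
    (∀ x ∈ f, (pvLk incoming x).isSome) →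
    f.length + pvS incoming v ≤ n →
    goA incoming n v f = goB incoming n v f := by
  intro n
  induction n using Nat.strong_induction_on with
  | _ n IH =>
    intro v f hf hlen
    cases f with
    | nil =>
      cases n <;> simp [goA, goB.eq_def]
    | cons x xs =>
      have hne : ¬ n < (x :: xs).length := by
        simp only [List.length_cons] at hlen ⊢; omega
      have herr : (goBLevel incoming (x :: xs) v).2.2 = false :=
        goBLevel_noerr incoming (x :: xs) v hf
      have hnil : (x :: xs) ≠ [] := by simp
      rw [goB.eq_def]
      simp only [dif_neg hnil, dif_neg hne, herr, Bool.false_eq_true, if_false]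
      have hn : n = (x :: xs).length + (n - (x :: xs).length) := by
        simp only [List.length_cons] at hlen ⊢; omega
      have hstep := goA_level incoming (x :: xs) (n - (x :: xs).length) v [] hf
      simp only [List.append_nil, List.nil_append] at hstep
      rw [hn, hstep]
      simp only [Nat.add_sub_cancel_left]
      have hS := goBLevel_S incoming (x :: xs) v herr
      apply IH
      · simp only [List.length_cons] at hlen ⊢; omega
      · intro y hy
        obtain ⟨p, hp, hyp⟩ := goBLevel_nf_sub incoming (x :: xs) v y hy
        exact hinc p hp y hyp
      · have hSv : pvS incoming v ≤ n - (x :: xs).length := by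
          simp only [List.length_cons] at hlen ⊢; omega
        omega

theorem pvS_empty (incoming : List (String × List String)) :
    pvS incoming PySem.Set.empty = (incoming.map (fun p => p.2.length)).sum := by
  simp [pvS, PySem.Set.empty]

-- ===== VERDICT (by name: the statement is the Claim_ definition above) =====
theorem walk_backward_py_spec : Claim_equal_walk_backward_py := by
  intro start_nodes incoming _ hpre
  unfold Spec_walk_backward_py walk_backward_py walk_backward_py_alt
  apply goA_eq_goB incoming hpre.2 (pvFuel start_nodes incoming) PySem.Set.empty start_nodes hpre.1
  rw [pvS_empty]
  simp [pvFuel]
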